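-- pv_equiv track=rewrite | github.com/iZackk26/Programming-Test-s | Lists/testing.py | groups_indx
-- ===== SOURCE A (Python) =====
-- def groups_indx(lista):
--     i = 0
--     data = []
--     for sublist in lista:
--         base = 0
--         while base < len(sublist):
--             if base == 0:
--                 data.append([sublist[base],2])
--             if base == 1:
--                 data.append([sublist[base],8])
--             if base == 2:
--                 data.append([sublist[base], 10])
--             base += 1
--         i += 1
--     return data
-- ===== SOURCE B (Python) =====
-- def groups_indx(lista):
--     if not lista:
--         return []
--     first, rest = lista[0], lista[1:]
--     n = len(first)
--     if n >= 3:
--         head = [[first[0], 2], [first[1], 8], [first[2], 10]]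
--     elif n == 2:
--         head = [[first[0], 2], [first[1], 8]]
--     elif n == 1:
--         head = [[first[0], 2]]
--     else:
--         head = []
--     return head + groups_indx(rest)
-- ===== Notes on version B (the rewrite author's own statement) =====
-- stated objective: alternative
-- what changed: Replaces the iterative accumulator with full-length per-index conditional dispatch by structural recursion on the outer list: each step case-analyses the first sublist's length, emits its weighted head block directly, and concatenates with the recursive result, never scanning past index 2.
import Mathlib
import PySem

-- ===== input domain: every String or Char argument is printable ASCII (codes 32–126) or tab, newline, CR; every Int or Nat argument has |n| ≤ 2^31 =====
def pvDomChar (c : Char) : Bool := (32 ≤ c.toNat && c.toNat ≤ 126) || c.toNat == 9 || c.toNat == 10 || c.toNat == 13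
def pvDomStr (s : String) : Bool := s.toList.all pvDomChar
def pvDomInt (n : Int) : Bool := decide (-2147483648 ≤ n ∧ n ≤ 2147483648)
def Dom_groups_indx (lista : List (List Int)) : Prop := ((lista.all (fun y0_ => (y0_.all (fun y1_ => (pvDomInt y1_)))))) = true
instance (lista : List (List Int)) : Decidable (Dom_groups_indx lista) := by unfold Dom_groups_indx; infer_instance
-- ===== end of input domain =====

-- B replaces A's accumulator loop with full-length per-index dispatch by structural
-- recursion on the outer list, case-analysing each sublist's length and emitting its
-- weighted head block directly (alternative decomposition; same output).

-- ===== PORT A =====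
def groups_indx (lista : List (List Int)) : List (List Int) :=
  lista.foldl (fun data sublist =>
    (PySem.List.pyRange 0 (sublist.length : Int) 1).foldl (fun data base =>
      let data := if base == 0 then data ++ [[PySem.List.pyGetD sublist base 0, 2]] else data
      let data := if base == 1 then data ++ [[PySem.List.pyGetD sublist base 0, 8]] else data
      if base == 2 then data ++ [[PySem.List.pyGetD sublist base 0, 10]] else data)
      data) []

-- ===== PORT B =====
def groups_indx_alt : List (List Int) → List (List Int)
  | [] => []
  | first :: rest =>
    let n : Int := first.length
    let head : List (List Int) :=
      if n ≥ 3 then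
        [[PySem.List.pyGetD first 0 0, 2], [PySem.List.pyGetD first 1 0, 8], [PySem.List.pyGetD first 2 0, 10]]
      else if n == 2 then
        [[PySem.List.pyGetD first 0 0, 2], [PySem.List.pyGetD first 1 0, 8]]
      else if n == 1 then
        [[PySem.List.pyGetD first 0 0, 2]]
      else []
    head ++ groups_indx_alt rest

-- ===== PRECONDITION & SPEC =====
def Spec_groups_indx (lista : List (List Int)) (out : List (List Int)) : Prop := out = groups_indx_alt lista
instance (lista : List (List Int)) (out : List (List Int)) : Decidable (Spec_groups_indx lista out) := by unfold Spec_groups_indx; infer_instance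

-- ===== CLAIM (what is proved, stated in full; the proofs are below) =====
def Claim_equal_groups_indx : Prop := ∀ (lista : List (List Int)), Dom_groups_indx lista → Spec_groups_indx lista (groups_indx lista)

-- ===== LEMMAS AND PROOFS =====

-- A's per-sublist step as a named function, for the lemmas below.
def pvStep (s : List Int) (data : List (List Int)) (base : Int) : List (List Int) :=
  let data := if base == 0 then data ++ [[PySem.List.pyGetD s base 0, 2]] else data
  let data := if base == 1 then data ++ [[PySem.List.pyGetD s base 0, 8]] else data
  if base == 2 then data ++ [[PySem.List.pyGetD s base 0, 10]] else data

-- Indices ≥ 3 leave the accumulator unchanged.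
theorem pvStep_skip (s : List Int) (a b : Int) (ha : 3 ≤ a) (acc : List (List Int)) :
    (PySem.List.pyRange a b 1).foldl (pvStep s) acc = acc := by
  by_cases h : b ≤ a
  · rw [PySem.List.pyRange_one_eq_nil h]; rfl
  · push Not at h
    rw [PySem.List.pyRange_one_cons h]
    have : pvStep s acc a = acc := by
      unfold pvStep
      have h0 : (a == 0) = false := by simp; omega
      have h1 : (a == 1) = false := by simp; omega
      have h2 : (a == 2) = false := by simp; omega
      simp [h0, h1, h2]
    rw [List.foldl_cons, this]
    exact pvStep_skip s (a + 1) b (by omega) acc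
termination_by (b - a).toNat
decreasing_by omega

-- The inner while loop appends exactly B's per-sublist head block.
theorem pvInner_eq (s : List Int) (acc : List (List Int)) :
    (PySem.List.pyRange 0 (s.length : Int) 1).foldl (pvStep s) acc
      = acc ++ groups_indx_alt [s] := by
  match s with
  | [] => simp [PySem.List.pyRange_one_eq_nil, groups_indx_alt]
  | [a] =>
      rw [show ((([a] : List Int).length : Int)) = 1 by simp,
          show PySem.List.pyRange 0 1 1 = [0] from by decide]
      simp [pvStep, groups_indx_alt, PySem.List.pyGetD]
  | [a, b] =>
      rw [show ((([a, b] : List Int).length : Int)) = 2 by simp,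
          show PySem.List.pyRange 0 2 1 = [0, 1] from by decide]
      simp [pvStep, groups_indx_alt, PySem.List.pyGetD, PySem.List.pyGet?, PySem.List.pyIdx?]
  | a :: b :: c :: t =>
      have hlen : (((a :: b :: c :: t : List Int).length : Int)) = 3 + t.length := by
        simp; omega
      rw [hlen, PySem.List.pyRange_one_append 0 3 (3 + t.length) (by norm_num) (by omega),
          List.foldl_append,
          show PySem.List.pyRange 0 3 1 = [0, 1, 2] from by decide]
      rw [pvStep_skip (a :: b :: c :: t) 3 (3 + t.length) (le_refl 3)]
      simp [pvStep, groups_indx_alt, PySem.List.pyGetD, PySem.List.pyGet?, PySem.List.pyIdx?]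
      intro h
      exact absurd h (by omega)

-- The whole function: A's outer fold computes B's recursion.
theorem pvOuter_eq (lista : List (List Int)) (init : List (List Int)) :
    lista.foldl (fun data sublist =>
        (PySem.List.pyRange 0 (sublist.length : Int) 1).foldl (pvStep sublist) data) init
      = init ++ groups_indx_alt lista := by
  induction lista generalizing init with
  | nil => simp [groups_indx_alt]
  | cons s rest ih =>
      rw [List.foldl_cons, pvInner_eq, ih]
      have : groups_indx_alt (s :: rest) = groups_indx_alt [s] ++ groups_indx_alt rest := by
        simp [groups_indx_alt]
      rw [this, List.append_assoc]

-- ===== VERDICT (by name: the statement is the Claim_ definition above) =====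
theorem groups_indx_spec : Claim_equal_groups_indx := by
  intro lista _
  unfold Spec_groups_indx groups_indx
  exact (pvOuter_eq lista []).symm ▸ rfl
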